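/- GENERATED by farm/mkstatement.py from design/units.tsv (unit `DGifGetImageDesc.5`) and the assertions of Gif/Spec/Seg_DGifGetImageDesc.lean — do not edit.
   THE STATEMENT of the proof unit `DGifGetImageDesc.5`: segment 5 of `DGifGetImageDesc` (24 instructions; entries 0x109535;
   exits 0x109583,0x10949a; ranges 0x109535-0x109583,0x10961e-0x109638)
   takes each of its entry assertions to one of its exit assertions (`Gif.Spec.DGifGetImageDesc.Seg5`), given the contracts of its callees.
   What the names mean: ProgX/Base/Spec/Basic.lean (the shared hypotheses), Gif/Spec/Seg_DGifGetImageDesc.lean (the assertions). The theorem to prove: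
   `theorem DGifGetImageDesc_5_ok : Gif.Spec.DGifGetImageDesc_5.Statement`. -/
import Gif.Code
import Gif.Dec.All
import Gif.Labels
import Gif.Spec.Alloc
import Gif.Spec.Seg_DGifGetImageDesc
namespace Gif.Spec.DGifGetImageDesc_5
open X86 X86.User Asan

/-- The statement of unit `DGifGetImageDesc.5`. -/
def Statement : Prop :=
  ∀ (Lay : Layout) (_hLay : Lay.hi = 0x1000000) (μ : Microarch) (_hμ : UserX.MicroOK μ) (u₀ : State)
    (_hcode : HasCodeNat Lay u₀ Gif.L.DGifGetImageDesc.entry Gif.Code.code_DGifGetImageDesc.nat Gif.L.DGifGetImageDesc.size)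
    (_h_GifMakeMapObject : ∀ (H : Heap) (rest : List Obj) (frames : List (Nat × FrameLayout)) (count : Nat), Calls Lay μ ProgX.Base.WayInv (ProgX.Base.conv u₀) Gif.L.GifMakeMapObject.entry (Gif.Spec.GifMakeMapObject.spec H rest frames count))
    (_h_asan_load8_noabort : Asan.SmallCheck Lay μ ProgX.Base.WayInv (ProgX.Base.CodeOK u₀) [.rax, .rcx, .rdx] 8 ProgX.Base.L.__asan_load8_noabort.entry)
    (_h_asan_load4_noabort : Asan.SmallCheck Lay μ ProgX.Base.WayInv (ProgX.Base.CodeOK u₀) [.rax, .rcx, .rdx] 4 ProgX.Base.L.__asan_load4_noabort.entry)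
    (_h_asan_store8_noabort : Asan.SmallCheck Lay μ ProgX.Base.WayInv (ProgX.Base.CodeOK u₀) [.rax, .rcx, .rdx] 8 ProgX.Base.L.__asan_store8_noabort.entry)
    (_h_asan_store4_noabort : Asan.SmallCheck Lay μ ProgX.Base.WayInv (ProgX.Base.CodeOK u₀) [.rax, .rcx, .rdx] 4 ProgX.Base.L.__asan_store4_noabort.entry),
    Gif.Spec.DGifGetImageDesc.Seg5 Lay μ u₀

end Gif.Spec.DGifGetImageDesc_5
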